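-- pv_equiv track=rewrite | github.com/phj9745/tta-ai-project | backend/app/routes/drive.py | _normalize_feature_list_records
-- ===== SOURCE A (Python) =====
-- from typing import Any, Callable, Dict, List, Literal, Mapping, Optional, Sequence, Tuple, TypedDict
--
-- def _normalize_feature_list_records(rows: Sequence[Dict[str, str]]) -> List[Dict[str, str]]:
--     normalized: List[Dict[str, str]] = []
--     for entry in rows:
--         normalized.append(
--             {
--                 "majorCategory": str(entry.get("majorCategory", "") or "").strip(),
--                 "middleCategory": str(entry.get("middleCategory", "") or "").strip(),
--                 "minorCategory": str(entry.get("minorCategory", "") or "").strip(),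
--                 "featureDescription": str(entry.get("featureDescription", "") or "").strip(),
--             }
--         )
--     return normalized
-- ===== SOURCE B (Python) =====
-- from typing import Dict, List, Sequence
--
-- _FIELDS = ("majorCategory", "middleCategory", "minorCategory", "featureDescription")
--
-- def _column(rows: Sequence[Dict[str, str]], field: str) -> List[str]:
--     return [str(entry.get(field, "") or "").strip() for entry in rows]
--
-- def _normalize_feature_list_records(rows: Sequence[Dict[str, str]]) -> List[Dict[str, str]]:
--     # Columnar strategy: extract each field as its own cleaned column (four staged
--     # passes over the rows), then zip the columns back together into records.
--     columns = [_column(rows, f) for f in _FIELDS]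
--     return [dict(zip(_FIELDS, values)) for values in zip(*columns)]
-- ===== Notes on version B (the rewrite author's own statement) =====
-- stated objective: alternative
-- what changed: Row-at-a-time accumulation is replaced by a columnar (struct-of-arrays) strategy: four staged passes each extract and strip one field into its own column list, and the result is rebuilt by zipping the four columns back into records.
import Mathlib
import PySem

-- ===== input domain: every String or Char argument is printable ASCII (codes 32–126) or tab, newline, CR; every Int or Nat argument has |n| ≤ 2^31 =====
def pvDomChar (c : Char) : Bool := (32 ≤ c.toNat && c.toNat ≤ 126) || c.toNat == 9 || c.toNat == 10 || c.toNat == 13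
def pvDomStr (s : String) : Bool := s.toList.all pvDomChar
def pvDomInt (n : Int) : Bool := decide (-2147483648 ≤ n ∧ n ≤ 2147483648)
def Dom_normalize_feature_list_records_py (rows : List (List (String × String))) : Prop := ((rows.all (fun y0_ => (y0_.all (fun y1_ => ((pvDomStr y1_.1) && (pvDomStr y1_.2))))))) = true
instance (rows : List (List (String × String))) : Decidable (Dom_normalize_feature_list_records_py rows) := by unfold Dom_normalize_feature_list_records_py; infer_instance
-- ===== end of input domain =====

-- B replaces A's row-at-a-time accumulator loop by a columnar strategy: four staged passes
-- extract one stripped field each into a column list, then the columns are zipped back into records.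

-- ===== PORT A =====
-- entry.get(k, ""): association-list lookup, first match, default "" ('or ""' and str() are
-- identity on the str values admitted here)
def pvGetField (entry : List (String × String)) (k : String) : String :=
  (((entry.find? (fun p => p.1 == k)).map (fun p => p.2)).getD "")

def normalize_feature_list_records_py (rows : List (List (String × String))) : List (List (String × String)) :=
  rows.foldl (fun normalized entry =>
    normalized ++ [[("majorCategory", PySem.Str.strip (pvGetField entry "majorCategory")),
                    ("middleCategory", PySem.Str.strip (pvGetField entry "middleCategory")),
                    ("minorCategory", PySem.Str.strip (pvGetField entry "minorCategory")),
                    ("featureDescription", PySem.Str.strip (pvGetField entry "featureDescription"))]]) []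

-- ===== PORT B =====
-- _column(rows, field): one pass extracting that field, stripped
def pvColumn (rows : List (List (String × String))) (f : String) : List String :=
  rows.map (fun entry => PySem.Str.strip (pvGetField entry f))

-- zip(*columns) + dict(zip(_FIELDS, values)): recombine the four columns into records
def pvZipRecords : List String → List String → List String → List String → List (List (String × String))
  | a :: as_, b :: bs, c :: cs, d :: ds =>
      [("majorCategory", a), ("middleCategory", b), ("minorCategory", c), ("featureDescription", d)]
        :: pvZipRecords as_ bs cs ds
  | _, _, _, _ => []

def normalize_feature_list_records_py_alt (rows : List (List (String × String))) : List (List (String × String)) :=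
  pvZipRecords (pvColumn rows "majorCategory") (pvColumn rows "middleCategory")
               (pvColumn rows "minorCategory") (pvColumn rows "featureDescription")

-- ===== PRECONDITION & SPEC =====
def Spec_normalize_feature_list_records_py (rows : List (List (String × String))) (out : List (List (String × String))) : Prop := out = normalize_feature_list_records_py_alt rows
instance (rows : List (List (String × String))) (out : List (List (String × String))) : Decidable (Spec_normalize_feature_list_records_py rows out) := by unfold Spec_normalize_feature_list_records_py; infer_instance

-- ===== CLAIM (what is proved, stated in full; the proofs are below) =====
def Claim_equal_normalize_feature_list_records_py : Prop := ∀ (rows : List (List (String × String))), Dom_normalize_feature_list_records_py rows → Spec_normalize_feature_list_records_py rows (normalize_feature_list_records_py rows)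

-- ===== LEMMAS AND PROOFS =====

theorem pv_foldl_append {α β : Type} (g : α → β) :
    ∀ (l : List α) (acc : List β), l.foldl (fun a e => a ++ [g e]) acc = acc ++ l.map g := by
  intro l
  induction l with
  | nil => intro acc; simp
  | cons x xs ih => intro acc; simp [List.foldl, ih, List.append_assoc]

theorem pv_zip_columns (rows : List (List (String × String))) :
    normalize_feature_list_records_py_alt rows =
      rows.map (fun entry =>
        [("majorCategory", PySem.Str.strip (pvGetField entry "majorCategory")),
         ("middleCategory", PySem.Str.strip (pvGetField entry "middleCategory")),
         ("minorCategory", PySem.Str.strip (pvGetField entry "minorCategory")),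
         ("featureDescription", PySem.Str.strip (pvGetField entry "featureDescription"))]) := by
  induction rows with
  | nil => rfl
  | cons e es ih =>
      simpa [normalize_feature_list_records_py_alt, pvColumn, pvZipRecords, List.map] using ih

-- ===== VERDICT (by name: the statement is the Claim_ definition above) =====
theorem normalize_feature_list_records_py_spec : Claim_equal_normalize_feature_list_records_py := by
  intro rows _
  unfold Spec_normalize_feature_list_records_py
  rw [pv_zip_columns]
  unfold normalize_feature_list_records_py
  rw [pv_foldl_append]
  simp
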